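-- pv_equiv track=rewrite | github.com/Harishacharya-redhat/cephci | tests/nfs/nfs_operations.py | exports_mounts_perclient
-- ===== SOURCE A (Python) =====
-- def exports_mounts_perclient(clients, nfs_export, nfs_mount, export_num) -> dict:
--     """
--     Args:
--         clients (list): List of client nodes
--         nfs_export (str): NFS export path
--         nfs_mount (str): NFS mount path
--         export_num (int): Number of exports to create
--     Returns:
--         dict: Dictionary mapping each client to its corresponding exports and mounts
--     """
--     export_list = [f"{nfs_export}_{i}" for i in range(export_num)]
--     mount_list = [f"{nfs_mount}_{i}" for i in range(export_num)]
--
--     # Divide exports among clients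
--     num_clients = len(clients)
--     exports_per_client = len(export_list) // num_clients
--     remainder = len(export_list) % num_clients
--     client_exports = []
--     client_mounts = []
--     start = 0
--
--     for i in range(num_clients):
--         end = start + exports_per_client + (1 if i < remainder else 0)
--         client_exports.append(export_list[start:end])
--         client_mounts.append(mount_list[start:end])
--         start = end
--
--     client_export_mount_dict = {}
--     for i in range(len(clients)):
--         client_export_mount_dict.update(
--             {
--                 clients[i]: {
--                     "export": client_exports[i],
--                     "mount": client_mounts[i],
--                 }
--             }
--         )
--     return client_export_mount_dict
-- ===== SOURCE B (Python) =====
-- def exports_mounts_perclient(clients, nfs_export, nfs_mount, export_num):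
--     n = len(clients)
--     total = max(export_num, 0)
--     q, r = divmod(total, n)
--     bound = lambda i: i * q + min(i, r)
--     return {
--         c: {
--             "export": [f"{nfs_export}_{j}" for j in range(bound(i), bound(i + 1))],
--             "mount": [f"{nfs_mount}_{j}" for j in range(bound(i), bound(i + 1))],
--         }
--         for i, c in enumerate(clients)
--     }
-- ===== Notes on version B (the rewrite author's own statement) =====
-- stated objective: simpler
-- what changed: Replaces A's two passes (a running-start slicing loop over pre-built export/mount name lists, then a second loop filling the dict) by a single dict comprehension over enumerate(clients) that computes each client's block bounds in closed form (i*q + min(i, r)) and generates that client's names directly, with no intermediate lists and no running accumulator.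
import Mathlib
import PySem

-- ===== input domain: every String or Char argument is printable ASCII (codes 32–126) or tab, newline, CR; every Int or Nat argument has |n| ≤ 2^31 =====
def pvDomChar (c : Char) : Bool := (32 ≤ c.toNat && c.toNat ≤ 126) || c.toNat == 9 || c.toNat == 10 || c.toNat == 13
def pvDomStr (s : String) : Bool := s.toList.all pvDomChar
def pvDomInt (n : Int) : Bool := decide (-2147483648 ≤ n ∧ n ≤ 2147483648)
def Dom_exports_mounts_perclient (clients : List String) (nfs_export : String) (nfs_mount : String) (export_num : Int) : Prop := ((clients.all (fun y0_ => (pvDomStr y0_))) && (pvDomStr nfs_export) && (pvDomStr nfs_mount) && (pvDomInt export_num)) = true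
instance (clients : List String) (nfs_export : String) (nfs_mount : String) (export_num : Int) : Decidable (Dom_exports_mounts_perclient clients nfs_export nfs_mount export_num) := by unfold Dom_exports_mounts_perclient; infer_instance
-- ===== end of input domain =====

-- B replaces A's running-start slicing loop and second dict-building loop by one pass over
-- enumerate(clients) with closed-form bounds i*q+min(i,r), generating each name directly (objective: simpler).

-- ===== PORT A =====
def exports_mounts_perclient (clients : List String) (nfs_export : String) (nfs_mount : String) (export_num : Int) : List (String × List (String × List String)) :=
  let export_list := (PySem.List.pyRange 0 export_num 1).map (fun i => nfs_export ++ "_" ++ PySem.Int.toStr i)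
  let mount_list := (PySem.List.pyRange 0 export_num 1).map (fun i => nfs_mount ++ "_" ++ PySem.Int.toStr i)
  let num_clients : Int := (clients.length : Int)
  let exports_per_client := PySem.Int.floordiv (export_list.length : Int) num_clients
  let remainder := PySem.Int.mod (export_list.length : Int) num_clients
  -- for i in range(num_clients): slice from the running start; state = (client_exports, client_mounts, start)
  let st := (PySem.List.pyRange 0 num_clients 1).foldl
    (fun (st : List (List String) × List (List String) × Int) i =>
      (st.1 ++ [PySem.List.slice export_list (some st.2.2) (some (st.2.2 + exports_per_client + (if i < remainder then 1 else 0)))],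
       st.2.1 ++ [PySem.List.slice mount_list (some st.2.2) (some (st.2.2 + exports_per_client + (if i < remainder then 1 else 0)))],
       st.2.2 + exports_per_client + (if i < remainder then 1 else 0)))
    ([], [], 0)
  let client_exports := st.1
  let client_mounts := st.2.1
  -- clients[i] is always in range here, so the "" / [] defaults of pyGetD are never used (exact)
  ((PySem.List.pyRange 0 (clients.length : Int) 1).foldl
    (fun (d : PySem.Dict String (List (String × List String))) i =>
      PySem.Dict.insert d (PySem.List.pyGetD clients i "")
        [("export", PySem.List.pyGetD client_exports i []),
         ("mount", PySem.List.pyGetD client_mounts i [])])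
    PySem.Dict.empty).items

-- ===== PORT B =====
def exports_mounts_perclient_alt (clients : List String) (nfs_export : String) (nfs_mount : String) (export_num : Int) : List (String × List (String × List String)) :=
  let n : Int := (clients.length : Int)
  let total : Int := max export_num 0
  let q := PySem.Int.floordiv total n
  let r := PySem.Int.mod total n
  let bound : Int → Int := fun i => i * q + min i r
  ((PySem.List.enumerate clients).foldl
    (fun (d : PySem.Dict String (List (String × List String))) p =>
      PySem.Dict.insert d p.2
        [("export", (PySem.List.pyRange (bound p.1) (bound (p.1 + 1)) 1).map (fun j => nfs_export ++ "_" ++ PySem.Int.toStr j)),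
         ("mount", (PySem.List.pyRange (bound p.1) (bound (p.1 + 1)) 1).map (fun j => nfs_mount ++ "_" ++ PySem.Int.toStr j))])
    PySem.Dict.empty).items

-- ===== PRECONDITION & SPEC =====
-- Pre_ excludes only clients = [], where A raises ZeroDivisionError (len(export_list) // 0), as does B.
def Pre_exports_mounts_perclient (clients : List String) (nfs_export : String) (nfs_mount : String) (export_num : Int) : Prop := clients ≠ []
instance (clients : List String) (nfs_export : String) (nfs_mount : String) (export_num : Int) : Decidable (Pre_exports_mounts_perclient clients nfs_export nfs_mount export_num) := by unfold Pre_exports_mounts_perclient; infer_instance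

def pvWitness_exports_mounts_perclient : List String × String × String × Int := (["c1", "c2"], "/export/nfs", "/mnt/nfs", 3)

def Spec_exports_mounts_perclient (clients : List String) (nfs_export : String) (nfs_mount : String) (export_num : Int) (out : List (String × List (String × List String))) : Prop := out = exports_mounts_perclient_alt clients nfs_export nfs_mount export_num
instance (clients : List String) (nfs_export : String) (nfs_mount : String) (export_num : Int) (out : List (String × List (String × List String))) : Decidable (Spec_exports_mounts_perclient clients nfs_export nfs_mount export_num out) := by unfold Spec_exports_mounts_perclient; infer_instance

-- ===== CLAIM (what is proved, stated in full; the proofs are below) =====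
def Claim_equal_exports_mounts_perclient : Prop := ∀ (clients : List String) (nfs_export : String) (nfs_mount : String) (export_num : Int), Dom_exports_mounts_perclient clients nfs_export nfs_mount export_num → Pre_exports_mounts_perclient clients nfs_export nfs_mount export_num → Spec_exports_mounts_perclient clients nfs_export nfs_mount export_num (exports_mounts_perclient clients nfs_export nfs_mount export_num)

-- ===== LEMMAS AND PROOFS =====

-- the closed-form start index of client i's block
def pvBnd (q r i : Int) : Int := i * q + min i r

theorem pvBnd_step (q r : Int) (i : Int) :
    pvBnd q r (i + 1) = pvBnd q r i + q + (if i < r then 1 else 0) := by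
  unfold pvBnd
  split_ifs with h
  · have h1 : min i r = i := by omega
    have h2 : min (i + 1) r = i + 1 := by omega
    rw [h1, h2]; ring
  · have h1 : min i r = r := by omega
    have h2 : min (i + 1) r = r := by omega
    rw [h1, h2]; ring

-- A's slicing loop, characterised: after n rounds the state is the closed-form lists and start = pvBnd q r n
theorem pvLoopA (el ml : List String) (q r : Int) (hr : 0 ≤ r) (n : Nat) :
    (PySem.List.pyRange 0 (n : Int) 1).foldl
      (fun (st : List (List String) × List (List String) × Int) i =>
        (st.1 ++ [PySem.List.slice el (some st.2.2) (some (st.2.2 + q + (if i < r then 1 else 0)))],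
         st.2.1 ++ [PySem.List.slice ml (some st.2.2) (some (st.2.2 + q + (if i < r then 1 else 0)))],
         st.2.2 + q + (if i < r then 1 else 0)))
      ([], [], 0)
    = ((List.range n).map (fun (k : Nat) => PySem.List.slice el (some (pvBnd q r (k : Int))) (some (pvBnd q r ((k : Int) + 1)))),
       (List.range n).map (fun (k : Nat) => PySem.List.slice ml (some (pvBnd q r (k : Int))) (some (pvBnd q r ((k : Int) + 1)))),
       pvBnd q r n) := by
  induction n with
  | zero => simp [pvBnd]; omega
  | succ m ih =>
    have hc : ((m + 1 : Nat) : Int) = (m : Int) + 1 := by push_cast; ring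
    rw [hc, PySem.List.pyRange_one_succ_right (by positivity), List.foldl_append, ih]
    simp only [List.foldl_cons, List.foldl_nil, List.range_succ]
    refine Prod.ext ?_ (Prod.ext ?_ ?_) <;> simp [← pvBnd_step]

-- drop from a mapped pyRange
theorem pvDrop_map_pyRange {β : Type} (g : Int → β) (j : Nat) :
    ∀ (a t : Int), (a : Int) + j ≤ t →
      ((PySem.List.pyRange a t 1).map g).drop j = (PySem.List.pyRange (a + j) t 1).map g := by
  induction j with
  | zero => intro a t _; simp
  | succ m ih =>
    intro a t h
    have ha : a < t := by omega
    rw [PySem.List.pyRange_one_cons ha]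
    have := ih (a + 1) t (by push_cast at h ⊢; omega)
    simp only [List.map_cons, List.drop_succ_cons, this]
    congr 1
    push_cast; ring_nf

-- take from a mapped pyRange
theorem pvTake_map_pyRange {β : Type} (g : Int → β) (k : Nat) :
    ∀ (a t : Int), (a : Int) + k ≤ t →
      ((PySem.List.pyRange a t 1).map g).take k = (PySem.List.pyRange a (a + k) 1).map g := by
  induction k with
  | zero =>
    intro a t _
    simp
  | succ m ih =>
    intro a t h
    have ha : a < t := by omega
    have ha' : a < a + ((m : Int) + 1) := by omega
    rw [PySem.List.pyRange_one_cons ha]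
    rw [show ((a : Int) + ((m : Nat) + 1 : Nat)) = a + ((m : Int) + 1) by push_cast; ring]
    rw [PySem.List.pyRange_one_cons ha']
    have := ih (a + 1) t (by push_cast at h ⊢; omega)
    simp only [List.map_cons, List.take_succ_cons, this]
    congr 3
    ring

-- slicing a mapped pyRange with in-range bounds is the mapped sub-range
theorem pvSlice_map_pyRange {β : Type} (g : Int → β) (t a b : Int)
    (h0 : 0 ≤ a) (hab : a ≤ b) (hbt : b ≤ t) :
    PySem.List.slice ((PySem.List.pyRange 0 t 1).map g) (some a) (some b)
      = (PySem.List.pyRange a b 1).map g := by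
  rw [PySem.List.slice_toNat _ h0 (by omega)]
  rw [pvDrop_map_pyRange g a.toNat 0 t (by omega)]
  rw [pvTake_map_pyRange g (b.toNat - a.toNat) (0 + a.toNat) t (by omega)]
  congr 3 <;> omega

-- empty range for a negative stop
theorem pvRange_neg (t : Int) (ht : t < 0) : PySem.List.pyRange 0 t 1 = [] := by
  simp [PySem.List.pyRange]; omega

theorem pvRange_max (t : Int) : PySem.List.pyRange 0 t 1 = PySem.List.pyRange 0 (max t 0) 1 := by
  by_cases h : 0 ≤ t
  · rw [max_eq_left h]
  · rw [max_eq_right (by omega), pvRange_neg t (by omega)]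
    simp [PySem.List.pyRange]

theorem pvLen_map_pyRange {β : Type} (g : Int → β) (t : Int) (ht : 0 ≤ t) :
    (((PySem.List.pyRange 0 t 1).map g).length : Int) = t := by
  obtain ⟨m, rfl⟩ := Int.eq_ofNat_of_zero_le ht
  rw [PySem.List.pyRange_zero_natCast]
  simp

-- ===== VERDICT (by name: the statement is the Claim_ definition above) =====
theorem exports_mounts_perclient_spec : Claim_equal_exports_mounts_perclient := by
  intro clients nfs_export nfs_mount export_num _ hpre
  unfold Spec_exports_mounts_perclient
  unfold Pre_exports_mounts_perclient at hpre
  have hn : 0 < (clients.length : Int) := by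
    have : clients.length ≠ 0 := fun h => hpre (List.eq_nil_of_length_eq_zero h)
    omega
  set n : Nat := clients.length with hndef
  set total : Int := max export_num 0 with htotdef
  have htot : 0 ≤ total := le_max_right _ _
  set gE : Int → String := fun i => nfs_export ++ "_" ++ PySem.Int.toStr i with hgE
  set gM : Int → String := fun i => nfs_mount ++ "_" ++ PySem.Int.toStr i with hgM
  have hlen : ((((PySem.List.pyRange 0 export_num 1).map gE).length : Nat) : Int) = total := by
    rw [pvRange_max]; exact pvLen_map_pyRange gE total htot
  set q : Int := PySem.Int.floordiv total (n : Int) with hq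
  set r : Int := PySem.Int.mod total (n : Int) with hr
  have hq0 : 0 ≤ q := by
    rw [hq, PySem.Int.floordiv_eq_ediv_of_pos hn]
    exact Int.ediv_nonneg htot (le_of_lt hn)
  have hr0 : 0 ≤ r := PySem.Int.mod_nonneg total hn
  have hrn : r < (n : Int) := PySem.Int.mod_lt total hn
  have hqr : q * (n : Int) + r = total := PySem.Int.floordiv_mul_add_mod total (n : Int)
  -- unfold both ports (ζ-reduces the lets)
  simp only [exports_mounts_perclient, exports_mounts_perclient_alt]
  rw [hlen]
  rw [show (PySem.List.pyRange 0 export_num 1).map gE = (PySem.List.pyRange 0 total 1).map gE by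
        rw [pvRange_max]]
  rw [show (PySem.List.pyRange 0 export_num 1).map gM = (PySem.List.pyRange 0 total 1).map gM by
        rw [pvRange_max]]
  rw [show (PySem.List.pyRange 0 (clients.length : Int) 1) = (PySem.List.pyRange 0 ((n : Nat) : Int) 1) from rfl]
  rw [pvLoopA ((PySem.List.pyRange 0 total 1).map gE) ((PySem.List.pyRange 0 total 1).map gM) q r hr0 n]
  -- B side: enumerate as a mapped pyRange over the same index list
  rw [PySem.List.enumerate_eq_map_pyRange clients "", List.foldl_map]
  rw [show PySem.List.len clients = ((n : Nat) : Int) by simp [PySem.List.len, hndef]]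
  congr 1
  apply PySem.List.foldl_congr_mem
  intro acc i hi
  rw [PySem.List.mem_pyRange_one] at hi
  obtain ⟨k, rfl⟩ := Int.eq_ofNat_of_zero_le hi.1
  have hk : k < n := by exact_mod_cast hi.2
  -- bounds for client k's block
  have hbmono : ∀ j : Int, 0 ≤ j → pvBnd q r j ≤ pvBnd q r (j + 1) := by
    intro j hj; rw [pvBnd_step]; split_ifs <;> omega
  have hb0 : ∀ j : Nat, 0 ≤ pvBnd q r j := by
    intro j
    unfold pvBnd
    have : 0 ≤ (j : Int) * q := mul_nonneg (by positivity) hq0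
    by_cases h : (j : Int) ≤ r
    · rw [min_eq_left h]; omega
    · rw [min_eq_right (by omega)]; omega
  have hbtop : pvBnd q r ((k : Int) + 1) ≤ total := by
    unfold pvBnd
    have hkn : (k : Int) + 1 ≤ (n : Int) := by exact_mod_cast hk
    have h1 : ((k : Int) + 1) * q ≤ (n : Int) * q := mul_le_mul_of_nonneg_right hkn hq0
    have h2 : min ((k : Int) + 1) r ≤ r := min_le_right _ _
    nlinarith [hqr]
  -- keys are syntactically equal; reduce to the value lists
  congr 1
  rw [PySem.List.pyGetD_natCast, PySem.List.pyGetD_natCast,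
      PySem.List.getD_map_range _ n k _ hk, PySem.List.getD_map_range _ n k _ hk]
  rw [pvSlice_map_pyRange gE total (pvBnd q r k) (pvBnd q r ((k : Int) + 1)) (hb0 k)
        (hbmono k (by positivity)) hbtop,
      pvSlice_map_pyRange gM total (pvBnd q r k) (pvBnd q r ((k : Int) + 1)) (hb0 k)
        (hbmono k (by positivity)) hbtop]
  simp [pvBnd]
  exact ⟨rfl, rfl⟩
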